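-- pv_equiv track=rewrite | github.com/Funkymunke15/Python-week-8 | Lecture8A lab2.py | compute
-- ===== SOURCE A (Python) =====
-- def compute(param_list):
--     total = 0
--
--     i = 0
--
--     while i <= len(param_list):
--         if i % 2:
--             total -= i
--         else:
--             total += i
--         i += 1
--
--     return total
-- ===== SOURCE B (Python) =====
-- def compute(param_list):
--     n = len(param_list)
--     return n // 2 if n % 2 == 0 else -((n + 1) // 2)
-- ===== Notes on version B (the rewrite author's own statement) =====
-- stated objective: faster
-- what changed: replaced the O(n) while-loop accumulating the alternating sum 0-1+2-...±n with the closed-form value n//2 (n even) or -((n+1)//2) (n odd) computed from len(param_list) alone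
import Mathlib
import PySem

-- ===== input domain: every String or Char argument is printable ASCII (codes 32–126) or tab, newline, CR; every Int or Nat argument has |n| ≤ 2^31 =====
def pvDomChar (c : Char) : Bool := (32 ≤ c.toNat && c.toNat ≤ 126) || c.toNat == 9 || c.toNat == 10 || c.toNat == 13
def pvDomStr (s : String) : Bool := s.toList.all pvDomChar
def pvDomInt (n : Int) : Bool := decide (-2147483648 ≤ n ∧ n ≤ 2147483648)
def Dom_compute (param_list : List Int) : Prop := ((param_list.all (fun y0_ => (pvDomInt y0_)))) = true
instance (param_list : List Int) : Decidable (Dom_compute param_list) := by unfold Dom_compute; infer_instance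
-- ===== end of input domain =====

-- ===== PORT A =====
-- literal port of A: while-loop i = 0 .. len(param_list) inclusive, total -= i on odd i, += on even
def compute (param_list : List Int) : Int :=
  (List.range (param_list.length + 1)).foldl
    (fun (total : Int) (i : Nat) => if i % 2 = 1 then total - (i : Int) else total + (i : Int)) 0

-- ===== PORT B =====
-- B: closed form from the length alone (O(1))
def compute_alt (param_list : List Int) : Int :=
  let n : Int := param_list.length
  if PySem.Int.mod n 2 = 0 then PySem.Int.floordiv n 2
  else -(PySem.Int.floordiv (n + 1) 2)

-- ===== PRECONDITION & SPEC =====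
def Spec_compute (param_list : List Int) (out : Int) : Prop := out = compute_alt param_list
instance (param_list : List Int) (out : Int) : Decidable (Spec_compute param_list out) := by unfold Spec_compute; infer_instance

-- ===== CLAIM (what is proved, stated in full; the proofs are below) =====
def Claim_equal_compute : Prop := ∀ (param_list : List Int), Dom_compute param_list → Spec_compute param_list (compute param_list)

-- ===== LEMMAS AND PROOFS =====

-- ===== VERDICT (by name: the statement is the Claim_ definition above) =====
theorem loop_eq (n : Nat) :
    (List.range (n + 1)).foldl
      (fun (total : Int) (i : Nat) => if i % 2 = 1 then total - (i : Int) else total + (i : Int)) 0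
      = if n % 2 = 0 then ((n / 2 : Nat) : Int) else -(((n + 1) / 2 : Nat) : Int) := by
  induction n with
  | zero => decide
  | succ m ih =>
    rw [List.range_succ, List.foldl_append, ih]
    simp only [List.foldl]
    split_ifs with h1 h2 h2 <;> push_cast <;> omega

theorem compute_spec : Claim_equal_compute := by
  intro l _
  unfold Spec_compute compute compute_alt
  rw [loop_eq]
  have h2 : PySem.Int.mod (l.length : Int) 2 = ((l.length % 2 : Nat) : Int) :=
    PySem.Int.mod_natCast l.length 2
  have hd : PySem.Int.floordiv (l.length : Int) 2 = ((l.length / 2 : Nat) : Int) :=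
    PySem.Int.floordiv_natCast l.length 2
  have hd2 : PySem.Int.floordiv ((l.length : Int) + 1) 2 = (((l.length + 1) / 2 : Nat) : Int) := by
    have := PySem.Int.floordiv_natCast (l.length + 1) 2
    push_cast at this ⊢
    exact this
  simp only [h2, hd, hd2]
  split_ifs with h1 h2 h2 <;> push_cast at * <;> omega
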